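-- pv_equiv track=rewrite | github.com/Referralconsequently/frankenlibc | scripts/generate_cve_hardened_assertions.py | classify_prevention_strategy
-- ===== SOURCE A (Python) =====
-- HEALING_STRATEGY = {
--     "ClampSize": "prevent",
--     "TruncateWithNull": "prevent",
--     "IgnoreDoubleFree": "quarantine",
--     "IgnoreForeignFree": "quarantine",
--     "ReallocAsMalloc": "safe-default",
--     "ReturnSafeDefault": "safe-default",
--     "UpgradeToSafeVariant": "prevent",
--     "FreedWithCanaryCorruption": "deny",
-- }
--
-- def classify_prevention_strategy(healing_actions):
--     """Classify the overall prevention strategy from healing actions."""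
--     strategies = set()
--     for action in healing_actions:
--         if action in HEALING_STRATEGY:
--             strategies.add(HEALING_STRATEGY[action])
--     if not strategies:
--         return "unknown"
--     # Priority: deny > prevent > quarantine > safe-default
--     for s in ["deny", "prevent", "quarantine", "safe-default"]:
--         if s in strategies:
--             return s
--     return "unknown"
-- ===== SOURCE B (Python) =====
-- # Single reducing pass keeping the minimum priority rank; no intermediate set, no second scan.
-- _RANK = {
--     "ClampSize": 1,
--     "TruncateWithNull": 1,
--     "IgnoreDoubleFree": 2,
--     "IgnoreForeignFree": 2,
--     "ReallocAsMalloc": 3,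
--     "ReturnSafeDefault": 3,
--     "UpgradeToSafeVariant": 1,
--     "FreedWithCanaryCorruption": 0,
-- }
--
-- def classify_prevention_strategy(healing_actions):
--     best = 4
--     for action in healing_actions:
--         r = _RANK.get(action, 4)
--         if r < best:
--             best = r
--     if best == 0:
--         return "deny"
--     if best == 1:
--         return "prevent"
--     if best == 2:
--         return "quarantine"
--     if best == 3:
--         return "safe-default"
--     return "unknown"
-- ===== Notes on version B (the rewrite author's own statement) =====
-- stated objective: simpler
-- what changed: Replaces A's two phases (build a set of strategy labels, then scan an ordered priority list for the first member) by one reducing pass that maps each action directly to a numeric priority rank and keeps the minimum, decoding the rank at the end.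
import Mathlib
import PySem

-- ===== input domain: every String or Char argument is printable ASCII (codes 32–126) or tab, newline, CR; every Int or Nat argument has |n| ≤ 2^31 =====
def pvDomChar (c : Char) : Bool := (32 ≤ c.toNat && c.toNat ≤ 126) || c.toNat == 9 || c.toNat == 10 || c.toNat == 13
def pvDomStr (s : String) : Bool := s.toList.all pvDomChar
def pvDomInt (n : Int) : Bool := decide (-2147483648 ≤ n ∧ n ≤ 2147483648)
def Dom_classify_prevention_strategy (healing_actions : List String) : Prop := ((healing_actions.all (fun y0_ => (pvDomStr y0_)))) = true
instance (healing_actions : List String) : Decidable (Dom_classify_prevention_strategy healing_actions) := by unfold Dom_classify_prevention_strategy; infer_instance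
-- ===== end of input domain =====

-- B replaces A's set-then-priority-scan with one reducing pass keeping the minimum rank (objective: simpler).

-- ===== PORT A =====
-- HEALING_STRATEGY module constant
def pvHealingStrategy : PySem.Dict String String := PySem.Dict.ofList
  [("ClampSize", "prevent"),
   ("TruncateWithNull", "prevent"),
   ("IgnoreDoubleFree", "quarantine"),
   ("IgnoreForeignFree", "quarantine"),
   ("ReallocAsMalloc", "safe-default"),
   ("ReturnSafeDefault", "safe-default"),
   ("UpgradeToSafeVariant", "prevent"),
   ("FreedWithCanaryCorruption", "deny")]

-- loop body: if action in HEALING_STRATEGY: strategies.add(HEALING_STRATEGY[action])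
def pvAStep (s : PySem.Set String) (action : String) : PySem.Set String :=
  match PySem.Dict.get? pvHealingStrategy action with
  | some v => PySem.Set.add s v
  | none => s

-- for s in ["deny", "prevent", "quarantine", "safe-default"]: if s in strategies: return s / return "unknown"
def pvPrioLoop (strategies : PySem.Set String) : List String → String
  | [] => "unknown"
  | s :: rest => if PySem.Set.contains strategies s then s else pvPrioLoop strategies rest

def classify_prevention_strategy (healing_actions : List String) : String :=
  let strategies := healing_actions.foldl pvAStep PySem.Set.empty
  if strategies = PySem.Set.empty then "unknown"
  else pvPrioLoop strategies ["deny", "prevent", "quarantine", "safe-default"]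

-- ===== PORT B =====
-- _RANK module constant of Source B
def pvRank : PySem.Dict String Nat := PySem.Dict.ofList
  [("ClampSize", 1),
   ("TruncateWithNull", 1),
   ("IgnoreDoubleFree", 2),
   ("IgnoreForeignFree", 2),
   ("ReallocAsMalloc", 3),
   ("ReturnSafeDefault", 3),
   ("UpgradeToSafeVariant", 1),
   ("FreedWithCanaryCorruption", 0)]

-- loop body: r = _RANK.get(action, 4); if r < best: best = r
def pvBStep (best : Nat) (action : String) : Nat :=
  let r := PySem.Dict.getD pvRank action 4
  if r < best then r else best

def classify_prevention_strategy_alt (healing_actions : List String) : String :=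
  let best := healing_actions.foldl pvBStep 4
  if best = 0 then "deny"
  else if best = 1 then "prevent"
  else if best = 2 then "quarantine"
  else if best = 3 then "safe-default"
  else "unknown"

-- ===== PRECONDITION & SPEC =====
def Spec_classify_prevention_strategy (healing_actions : List String) (out : String) : Prop := out = classify_prevention_strategy_alt healing_actions
instance (healing_actions : List String) (out : String) : Decidable (Spec_classify_prevention_strategy healing_actions out) := by unfold Spec_classify_prevention_strategy; infer_instance

-- ===== CLAIM (what is proved, stated in full; the proofs are below) =====
def Claim_equal_classify_prevention_strategy : Prop := ∀ (healing_actions : List String), Dom_classify_prevention_strategy healing_actions → Spec_classify_prevention_strategy healing_actions (classify_prevention_strategy healing_actions)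

-- ===== LEMMAS AND PROOFS =====

-- minimum rank represented by a set of strategy labels
def pvMinRank (s : PySem.Set String) : Nat :=
  if PySem.Set.contains s "deny" then 0
  else if PySem.Set.contains s "prevent" then 1
  else if PySem.Set.contains s "quarantine" then 2
  else if PySem.Set.contains s "safe-default" then 3
  else 4

-- joint lookup fact specific to the two literal tables
theorem pvLookup (a : String) :
    (PySem.Dict.get? pvHealingStrategy a = none ∧ PySem.Dict.getD pvRank a 4 = 4) ∨
    (PySem.Dict.get? pvHealingStrategy a = some "deny" ∧ PySem.Dict.getD pvRank a 4 = 0) ∨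
    (PySem.Dict.get? pvHealingStrategy a = some "prevent" ∧ PySem.Dict.getD pvRank a 4 = 1) ∨
    (PySem.Dict.get? pvHealingStrategy a = some "quarantine" ∧ PySem.Dict.getD pvRank a 4 = 2) ∨
    (PySem.Dict.get? pvHealingStrategy a = some "safe-default" ∧ PySem.Dict.getD pvRank a 4 = 3) := by
  have hH : pvHealingStrategy = PySem.Dict.mk
      [("ClampSize", "prevent"), ("TruncateWithNull", "prevent"), ("IgnoreDoubleFree", "quarantine"),
       ("IgnoreForeignFree", "quarantine"), ("ReallocAsMalloc", "safe-default"),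
       ("ReturnSafeDefault", "safe-default"), ("UpgradeToSafeVariant", "prevent"),
       ("FreedWithCanaryCorruption", "deny")] := by decide
  have hR : pvRank = PySem.Dict.mk
      [("ClampSize", 1), ("TruncateWithNull", 1), ("IgnoreDoubleFree", 2),
       ("IgnoreForeignFree", 2), ("ReallocAsMalloc", 3), ("ReturnSafeDefault", 3),
       ("UpgradeToSafeVariant", 1), ("FreedWithCanaryCorruption", 0)] := by decide
  rw [hH, hR]
  simp only [PySem.Dict.getD, PySem.Dict.get?_mk_cons]
  split_ifs <;> simp_all [PySem.Dict.get?]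

theorem pvMinRank_add (s : PySem.Set String) (v : String)
    (hv : v = "deny" ∨ v = "prevent" ∨ v = "quarantine" ∨ v = "safe-default") :
    pvMinRank (PySem.Set.add s v) =
      if (match v with
          | "deny" => 0 | "prevent" => 1 | "quarantine" => 2 | _ => (3 : Nat)) < pvMinRank s
      then (match v with
          | "deny" => 0 | "prevent" => 1 | "quarantine" => 2 | _ => (3 : Nat))
      else pvMinRank s := by
  rcases hv with rfl | rfl | rfl | rfl <;>
    · unfold pvMinRank
      simp only [PySem.Set.contains, PySem.Set.add]
      split_ifs <;> simp_all

theorem pvMinRank_le (s : PySem.Set String) : pvMinRank s ≤ 4 := by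
  unfold pvMinRank; split_ifs <;> omega

theorem pvMinRank_step (s : PySem.Set String) (a : String) :
    pvMinRank (pvAStep s a) = pvBStep (pvMinRank s) a := by
  unfold pvAStep pvBStep
  rcases pvLookup a with ⟨h1, h2⟩ | ⟨h1, h2⟩ | ⟨h1, h2⟩ | ⟨h1, h2⟩ | ⟨h1, h2⟩ <;>
    rw [h1] <;> simp only [h2]
  · have := pvMinRank_le s; split_ifs <;> omega
  · exact pvMinRank_add s "deny" (Or.inl rfl)
  · exact pvMinRank_add s "prevent" (Or.inr (Or.inl rfl))
  · exact pvMinRank_add s "quarantine" (Or.inr (Or.inr (Or.inl rfl)))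
  · exact pvMinRank_add s "safe-default" (Or.inr (Or.inr (Or.inr rfl)))

theorem pvMinRank_foldl (xs : List String) (s : PySem.Set String) :
    pvMinRank (xs.foldl pvAStep s) = xs.foldl pvBStep (pvMinRank s) := by
  induction xs generalizing s with
  | nil => rfl
  | cons a xs ih => simp [List.foldl_cons, pvMinRank_step, ih]

theorem pvFinal (s : PySem.Set String) :
    (if s = PySem.Set.empty then "unknown"
     else pvPrioLoop s ["deny", "prevent", "quarantine", "safe-default"]) =
    (if pvMinRank s = 0 then "deny"
     else if pvMinRank s = 1 then "prevent"
     else if pvMinRank s = 2 then "quarantine"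
     else if pvMinRank s = 3 then "safe-default"
     else "unknown") := by
  by_cases he : s = PySem.Set.empty
  · subst he; simp [pvMinRank, PySem.Set.empty, PySem.Set.contains]
  · simp only [he, if_false]
    unfold pvMinRank
    split_ifs <;> simp_all [pvPrioLoop, PySem.Set.contains]

-- ===== VERDICT (by name: the statement is the Claim_ definition above) =====
theorem classify_prevention_strategy_spec : Claim_equal_classify_prevention_strategy := by
  intro xs _
  unfold Spec_classify_prevention_strategy classify_prevention_strategy classify_prevention_strategy_alt
  rw [pvFinal, pvMinRank_foldl]
  rfl
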